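-- pv_equiv track=rewrite | github.com/Shuaib-Tabit1/Telemetry-Refactoring-Agent | telemetry-scanner/scanner/advanced_llm_reasoning.py | _extract_final_conclusion
-- ===== SOURCE A (Python) =====
-- def _extract_final_conclusion(text: str) -> str:
--     """Extract the final conclusion from reasoning text."""
--     lines = text.split('\n')
--     # Look for conclusion keywords
--     for line in reversed(lines):
--         if any(keyword in line.lower() for keyword in ['conclusion', 'final', 'result', 'recommendation']):
--             return line.strip()
--
--     # Fallback to last non-empty line
--     for line in reversed(lines):
--         if line.strip():
--             return line.strip()
--
--     return "No clear conclusion found"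
-- ===== SOURCE B (Python) =====
-- def _extract_final_conclusion(text: str) -> str:
--     """Extract the final conclusion from reasoning text (single forward pass)."""
--     last_keyword = None
--     last_nonempty = None
--     for line in text.split('\n'):
--         low = line.lower()
--         if 'conclusion' in low or 'final' in low or 'result' in low or 'recommendation' in low:
--             last_keyword = line
--         if line.strip():
--             last_nonempty = line
--     if last_keyword is not None:
--         return last_keyword.strip()
--     if last_nonempty is not None:
--         return last_nonempty.strip()
--     return "No clear conclusion found"
-- ===== Notes on version B (the rewrite author's own statement) =====
-- stated objective: alternative
-- what changed: Replaces A's two sequential reversed scans (any() over a keyword list inside the first) with one forward pass maintaining two accumulators (last keyword line, last non-empty line), combined after the loop.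
import Mathlib
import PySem

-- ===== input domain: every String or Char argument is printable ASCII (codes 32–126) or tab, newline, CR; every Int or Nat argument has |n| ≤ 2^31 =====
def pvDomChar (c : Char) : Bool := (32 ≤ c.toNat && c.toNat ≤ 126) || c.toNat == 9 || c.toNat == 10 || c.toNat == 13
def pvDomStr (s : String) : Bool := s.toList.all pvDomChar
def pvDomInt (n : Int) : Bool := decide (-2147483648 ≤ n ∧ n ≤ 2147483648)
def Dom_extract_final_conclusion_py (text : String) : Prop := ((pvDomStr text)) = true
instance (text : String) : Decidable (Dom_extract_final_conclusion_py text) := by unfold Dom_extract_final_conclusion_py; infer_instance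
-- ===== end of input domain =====

-- B replaces A's two reversed scans with one forward pass keeping two accumulators; same O(n) cost, different decomposition.


-- ===== PORT A =====
-- any(keyword in line.lower() for keyword in [...])
def pvHasKw (line : String) : Bool :=
  ["conclusion", "final", "result", "recommendation"].any
    (fun kw => PySem.Str.isIn kw (PySem.Str.lower line))

def extract_final_conclusion_py (text : String) : String :=
  let lines := (PySem.Str.split? text "\n").getD []
  -- first reversed scan: conclusion keywords
  match lines.reverse.find? pvHasKw with
  | some line => PySem.Str.strip line
  | none =>
    -- second reversed scan: last non-empty line
    match lines.reverse.find? (fun line => PySem.Str.strip line != "") with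
    | some line => PySem.Str.strip line
    | none => "No clear conclusion found"

-- ===== PORT B =====
-- 'conclusion' in low or 'final' in low or ...
def pvKwB (line : String) : Bool :=
  let low := PySem.Str.lower line
  PySem.Str.isIn "conclusion" low || PySem.Str.isIn "final" low ||
  PySem.Str.isIn "result" low || PySem.Str.isIn "recommendation" low

def extract_final_conclusion_py_alt (text : String) : String :=
  let st := ((PySem.Str.split? text "\n").getD []).foldl
    (fun (acc : Option String × Option String) line =>
      (if pvKwB line then some line else acc.1,
       if PySem.Str.strip line != "" then some line else acc.2))
    (none, none)
  match st.1 with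
  | some line => PySem.Str.strip line
  | none =>
    match st.2 with
    | some line => PySem.Str.strip line
    | none => "No clear conclusion found"

-- ===== PRECONDITION & SPEC =====
def Spec_extract_final_conclusion_py (text : String) (out : String) : Prop := out = extract_final_conclusion_py_alt text
instance (text : String) (out : String) : Decidable (Spec_extract_final_conclusion_py text out) := by unfold Spec_extract_final_conclusion_py; infer_instance

-- ===== CLAIM (what is proved, stated in full; the proofs are below) =====
def Claim_equal_extract_final_conclusion_py : Prop := ∀ (text : String), Dom_extract_final_conclusion_py text → Spec_extract_final_conclusion_py text (extract_final_conclusion_py text)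

-- ===== LEMMAS AND PROOFS =====

-- B's folded pair of "last matching line" accumulators equals A's find? over the reversed list.
theorem pv_foldl_last (p q : String → Bool) (l : List String) (a b : Option String) :
    l.foldl (fun (acc : Option String × Option String) line =>
      (if p line then some line else acc.1, if q line then some line else acc.2)) (a, b)
    = ((l.reverse.find? p).or a, (l.reverse.find? q).or b) := by
  induction l generalizing a b with
  | nil => simp
  | cons x l ih =>
    simp only [List.foldl_cons, ih, List.reverse_cons, List.find?_append]
    cases hp : p x <;> cases hq : q x <;>
      simp [List.find?, hp, hq]

theorem pv_kw_eq : pvHasKw = pvKwB := by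
  funext line
  simp [pvHasKw, pvKwB, List.any, Bool.or_assoc]

-- ===== VERDICT (by name: the statement is the Claim_ definition above) =====
theorem extract_final_conclusion_py_spec : Claim_equal_extract_final_conclusion_py := by
  intro text _
  unfold Spec_extract_final_conclusion_py extract_final_conclusion_py extract_final_conclusion_py_alt
  rw [pv_foldl_last, pv_kw_eq]
  simp
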